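-- pv_equiv track=rewrite | github.com/maw3193/aoc-2016 | 7/7-1.py | address_is_valid
-- ===== SOURCE A (Python) =====
-- def find_abba(s):
--     for i in range(0, len(s) - 3):
--         if s[i] != s[i+1] and s[i] == s[i+3] and s[i+1] == s[i+2]:
--             return True
--     return False
--
-- def address_is_valid(address):
--     for bracketed in address["bracketed"]:
--         if find_abba(bracketed):
--             return False
--     for unbracketed in address["unbracketed"]:
--         if find_abba(unbracketed):
--             return True
--     return False
-- ===== SOURCE B (Python) =====
-- def address_is_valid(address):
--     def has_abba(s):
--         # centre-based: find positions of adjacent equal pairs (the "bb" centres),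
--         # then check each centre's outer characters mirror and differ
--         centers = [j for j in range(1, len(s)) if s[j-1] == s[j]]
--         return any(2 <= j < len(s) - 1 and s[j-2] == s[j+1] != s[j] for j in centers)
--     if any(map(has_abba, address["bracketed"])):
--         return False
--     return any(map(has_abba, address["unbracketed"]))
-- ===== Notes on version B (the rewrite author's own statement) =====
-- stated objective: alternative
-- what changed: ABBA detection is centre-based instead of window-based: B first collects the positions of adjacent equal character pairs (the 'bb' centres) and then checks each centre's outer characters for a differing mirror, and the wrapper's early-return loops become any(map(...)) expressions; A slides a 4-character window over every index.
-- outside the precondition, e.g. on address_is_valid({'bracketed': ['abba']}): A returns False, B returns False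
import Mathlib
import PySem

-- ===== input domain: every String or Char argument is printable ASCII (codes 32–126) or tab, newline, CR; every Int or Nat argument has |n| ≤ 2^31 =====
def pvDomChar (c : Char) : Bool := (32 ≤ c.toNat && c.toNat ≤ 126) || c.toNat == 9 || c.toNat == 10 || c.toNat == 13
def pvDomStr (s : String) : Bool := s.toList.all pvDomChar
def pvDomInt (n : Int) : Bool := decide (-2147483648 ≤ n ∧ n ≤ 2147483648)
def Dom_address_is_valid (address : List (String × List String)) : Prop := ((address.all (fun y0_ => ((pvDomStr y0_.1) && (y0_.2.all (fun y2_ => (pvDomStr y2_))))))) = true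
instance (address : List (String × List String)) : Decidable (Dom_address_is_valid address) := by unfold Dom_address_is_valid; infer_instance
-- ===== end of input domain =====

-- B detects an ABBA centre-first (collect adjacent equal pairs, then check each centre's
-- outer characters) instead of A's 4-character sliding window (objective: alternative).

-- shared helper: address[k] for the dict argument (first-match association-list lookup; none = KeyError)
def pyGetItem? (d : List (String × List String)) (k : String) : Option (List String) :=
  match d with
  | [] => none
  | (k', v) :: rest => if k' == k then some v else pyGetItem? rest k

-- ===== PORT A =====
def find_abba (s : String) : Bool :=
  (PySem.List.pyRange 0 (PySem.Str.len s - 3) 1).foldl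
    (fun found i =>
      found ||
        ((PySem.Str.pyGet? s i != PySem.Str.pyGet? s (i+1)) &&
         (PySem.Str.pyGet? s i == PySem.Str.pyGet? s (i+3)) &&
         (PySem.Str.pyGet? s (i+1) == PySem.Str.pyGet? s (i+2))))
    false

-- the second Python loop: 'for unbracketed in …: if find_abba(unbracketed): return True; return False'
def unbracketedLoop : List String → Bool
  | [] => false
  | u :: rest => if find_abba u then true else unbracketedLoop rest

-- the first Python loop; address["unbracketed"] is only read after the loop completes, as in Python
def bracketedLoop : List String → List (String × List String) → Bool
  | [], address =>
      match pyGetItem? address "unbracketed" with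
      | none => false   -- KeyError; excluded by Pre_
      | some un => unbracketedLoop un
  | b :: rest, address => if find_abba b then false else bracketedLoop rest address

def address_is_valid (address : List (String × List String)) : Bool :=
  match pyGetItem? address "bracketed" with
  | none => false       -- KeyError; excluded by Pre_
  | some br => bracketedLoop br address

-- ===== PORT B =====
-- Source B's has_abba: collect the centres j (1 ≤ j < len) with s[j-1] == s[j], then test
-- '2 <= j < len(s) - 1 and s[j-2] == s[j+1] != s[j]' for some centre (indices all in range,
-- so plain getElem? is exact here)
def has_abba (l : List Char) : Bool :=
  let centers := (List.range' 1 (l.length - 1)).filter (fun j => l[j-1]? == l[j]?)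
  centers.any (fun j =>
    decide (2 ≤ j) && decide (j < l.length - 1) && (l[j-2]? == l[j+1]?) && (l[j+1]? != l[j]?))

def address_is_valid_alt (address : List (String × List String)) : Bool :=
  match pyGetItem? address "bracketed" with
  | none => false       -- KeyError; excluded by Pre_
  | some br =>
    if br.any (fun s => has_abba s.toList) then false
    else
      match pyGetItem? address "unbracketed" with
      | none => false   -- KeyError; excluded by Pre_
      | some un => un.any (fun s => has_abba s.toList)

-- ===== PRECONDITION & SPEC =====
-- Pre_ excludes dicts missing the "bracketed" or "unbracketed" key, on which both A and B raise
-- KeyError (except the corner where an ABBA in a bracketed section returns False before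
-- "unbracketed" is read — there both A and B still return False, see the cited example).
def Pre_address_is_valid (address : List (String × List String)) : Prop :=
  (address.any (fun p => p.1 == "bracketed")) = true ∧
  (address.any (fun p => p.1 == "unbracketed")) = true
instance (address : List (String × List String)) : Decidable (Pre_address_is_valid address) := by
  unfold Pre_address_is_valid; infer_instance

def pvWitness_address_is_valid : (List (String × List String)) :=
  [("bracketed", ["xyyx"]), ("unbracketed", ["abba"])]

def Spec_address_is_valid (address : List (String × List String)) (out : Bool) : Prop := out = address_is_valid_alt address
instance (address : List (String × List String)) (out : Bool) : Decidable (Spec_address_is_valid address out) := by unfold Spec_address_is_valid; infer_instance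

-- ===== CLAIM (what is proved, stated in full; the proofs are below) =====
def Claim_equal_address_is_valid : Prop := ∀ (address : List (String × List String)), Dom_address_is_valid address → Pre_address_is_valid address → Spec_address_is_valid address (address_is_valid address)

-- ===== LEMMAS AND PROOFS =====

-- the window condition of A, over the character list
def winCond (l : List Char) (k : Nat) : Bool :=
  (l[k]? != l[k+1]?) && (l[k]? == l[k+3]?) && (l[k+1]? == l[k+2]?)

theorem foldl_or_eq_any {α : Type} (xs : List α) (p : α → Bool) (b : Bool) :
    xs.foldl (fun acc x => acc || p x) b = (b || xs.any p) := by
  induction xs generalizing b with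
  | nil => simp
  | cons x rest ih => simp [List.foldl, ih, Bool.or_assoc]

theorem anyCongrMem {α : Type} (l : List α) (p q : α → Bool) (h : ∀ x ∈ l, p x = q x) :
    l.any p = l.any q := by
  induction l with
  | nil => rfl
  | cons x t ih => simp only [List.any_cons, h x (by simp), ih (fun y hy => h y (by simp [hy]))]

theorem find_abba_eq_any (s : String) :
    find_abba s = (List.range (s.toList.length - 3)).any (winCond s.toList) := by
  unfold find_abba
  rw [foldl_or_eq_any, Bool.false_or, PySem.List.pyRange_one, List.any_map]
  have hlen : (PySem.Str.len s - 3 - 0).toNat = s.toList.length - 3 := by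
    simp; omega
  rw [hlen]
  apply anyCongrMem
  intro k hk
  simp only [Function.comp, zero_add]
  rw [show ((k : Int) + 1) = (((k + 1 : Nat) : Int)) from by push_cast; ring,
      show ((k : Int) + 3) = (((k + 3 : Nat) : Int)) from by push_cast; ring,
      show ((k : Int) + 2) = (((k + 2 : Nat) : Int)) from by push_cast; ring]
  simp only [PySem.Str.pyGet?_natCast]
  rfl

-- the window scan and the centre scan find an ABBA on exactly the same strings
theorem any_range_winCond_eq_has_abba (l : List Char) :
    (List.range (l.length - 3)).any (winCond l) = has_abba l := by
  unfold has_abba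
  apply Bool.eq_iff_iff.mpr
  simp only [List.any_eq_true, List.mem_filter, List.mem_range, List.mem_range',
    Bool.and_eq_true, decide_eq_true_eq, winCond, bne_iff_ne, beq_iff_eq, ne_eq]
  constructor
  · rintro ⟨i, hi, ⟨hne, h03⟩, h12⟩
    refine ⟨i + 2, ⟨⟨i + 1, by omega, by omega⟩, ?_⟩, ⟨⟨by omega, by omega⟩, ?_⟩, ?_⟩
    · show l[i + 2 - 1]? = l[i + 2]?
      have h : i + 2 - 1 = i + 1 := by omega
      rw [h]; exact h12
    · show l[i + 2 - 2]? = l[i + 2 + 1]?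
      have h : i + 2 - 2 = i := by omega
      rw [h]; exact h03
    · show ¬ l[i + 2 + 1]? = l[i + 2]?
      intro h; exact hne (by rw [h03, h, h12])
  · rintro ⟨j, ⟨-, hc⟩, ⟨⟨hj3, hj4⟩, houter⟩, hneq⟩
    obtain ⟨i, rfl⟩ : ∃ i, j = i + 2 := ⟨j - 2, by omega⟩
    have hc' : l[i + 1]? = l[i + 2]? := by
      have h : i + 2 - 1 = i + 1 := by omega
      rw [h] at hc; exact hc
    have houter' : l[i]? = l[i + 3]? := by
      have h2 : i + 2 - 2 = i := by omega
      rw [h2] at houter; exact houter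
    refine ⟨i, by omega, ⟨fun h => hneq (by rw [← houter', h, hc']), houter'⟩, hc'⟩

theorem find_abba_eq_has_abba (s : String) : find_abba s = has_abba s.toList := by
  rw [find_abba_eq_any, any_range_winCond_eq_has_abba]

theorem unbracketedLoop_eq_any (xs : List String) :
    unbracketedLoop xs = xs.any (fun s => has_abba s.toList) := by
  induction xs with
  | nil => rfl
  | cons u rest ih =>
    simp only [unbracketedLoop, find_abba_eq_has_abba, ih, List.any_cons]
    by_cases h : has_abba u.toList = true <;> simp [h]

theorem bracketedLoop_eq (br : List String) (address : List (String × List String)) :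
    bracketedLoop br address =
      if br.any (fun s => has_abba s.toList) then false
      else
        match pyGetItem? address "unbracketed" with
        | none => false
        | some un => un.any (fun s => has_abba s.toList) := by
  induction br with
  | nil => simp [bracketedLoop, unbracketedLoop_eq_any]
  | cons b rest ih =>
    simp only [bracketedLoop, find_abba_eq_has_abba, List.any_cons]
    by_cases h : has_abba b.toList = true <;> simp [h, ih]

-- ===== VERDICT (by name: the statement is the Claim_ definition above) =====
theorem address_is_valid_spec : Claim_equal_address_is_valid := by
  intro address _ _
  unfold Spec_address_is_valid address_is_valid address_is_valid_alt
  cases h : pyGetItem? address "bracketed" with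
  | none => rfl
  | some br => simp [bracketedLoop_eq]
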